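-- pv_equiv track=rewrite | github.com/Eddie123XXXX/AIWeb | backend/rag/chunking.py | _split_by_separators
-- ===== SOURCE A (Python) =====
-- def _split_by_separators(text: str, separators: list[str]) -> list[str]:
--     if not separators:
--         return [text]
--
--     sep = separators[0]
--     rest = separators[1:]
--
--     parts = text.split(sep)
--     parts = [p for p in parts if p.strip()]
--
--     if len(parts) <= 1 and rest:
--         return _split_by_separators(text, rest)
--
--     return parts
-- ===== SOURCE B (Python) =====
-- def _split_by_separators(text: str, separators: list[str]) -> list[str]:
--     if not separators:
--         return [text]
--     last = len(separators) - 1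
--     for i, sep in enumerate(separators):
--         parts = [p for p in text.split(sep) if p.strip()]
--         if len(parts) > 1 or i == last:
--             return parts
-- ===== Notes on version B (the rewrite author's own statement) =====
-- stated objective: idiomatic
-- what changed: Replaces the tail recursion over the separator list (re-slicing separators[1:] on each call) with a single explicit enumerate loop that returns on the first effective split or on the last separator.
-- outside the precondition, e.g. on _split_by_separators('a b', [' ', '']): A returns ['a', 'b'], B returns ['a', 'b']
import Mathlib
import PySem

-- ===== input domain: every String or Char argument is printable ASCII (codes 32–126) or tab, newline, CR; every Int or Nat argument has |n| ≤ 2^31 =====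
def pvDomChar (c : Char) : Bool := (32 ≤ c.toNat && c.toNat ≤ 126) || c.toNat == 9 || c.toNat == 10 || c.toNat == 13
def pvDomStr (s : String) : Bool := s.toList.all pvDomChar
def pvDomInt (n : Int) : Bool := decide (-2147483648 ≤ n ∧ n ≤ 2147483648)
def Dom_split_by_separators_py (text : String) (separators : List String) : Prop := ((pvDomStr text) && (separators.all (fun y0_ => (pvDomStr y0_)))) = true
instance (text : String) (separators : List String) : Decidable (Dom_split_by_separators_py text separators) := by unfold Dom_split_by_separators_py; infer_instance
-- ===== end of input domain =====

-- B replaces A's tail recursion over separators[1:] with an explicit indexed loop; return value only, no side effects.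


-- ===== PORT A =====
def split_by_separators_py (text : String) (separators : List String) : List String :=
  match separators with
  | [] => [text]
  | sep :: rest =>
    let parts := ((PySem.Str.split? text sep).getD []).filter (fun p => PySem.Str.strip p != "")
    if parts.length ≤ 1 ∧ rest ≠ [] then split_by_separators_py text rest
    else parts

-- ===== PORT B =====
-- the 'for i, sep in enumerate(separators)' loop, carrying the running index i and the fixed last index
def splitLoopB (text : String) (last : Nat) (i : Nat) : List String → List String
  | [] => []   -- unreachable: the Python loop always returns before exhausting
  | sep :: more =>
    let parts := ((PySem.Str.split? text sep).getD []).filter (fun p => PySem.Str.strip p != "")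
    if parts.length > 1 ∨ i = last then parts
    else splitLoopB text last (i + 1) more

def split_by_separators_py_alt (text : String) (separators : List String) : List String :=
  if separators = [] then [text]
  else splitLoopB text (separators.length - 1) 0 separators

-- ===== PRECONDITION & SPEC =====
-- Pre_ excludes an empty-string separator anywhere in the list: Python's str.split('') raises
-- ValueError in both programs when reached; when an earlier separator already returns, A (and B)
-- return normally, so this is slightly wider than the crashing set (see claim cites).
def Pre_split_by_separators_py (text : String) (separators : List String) : Prop := "" ∉ separators
instance (text : String) (separators : List String) : Decidable (Pre_split_by_separators_py text separators) := by unfold Pre_split_by_separators_py; infer_instance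

def pvWitness_split_by_separators_py : String × List String := ("a b,c", [",", " "])

def Spec_split_by_separators_py (text : String) (separators : List String) (out : List String) : Prop := out = split_by_separators_py_alt text separators
instance (text : String) (separators : List String) (out : List String) : Decidable (Spec_split_by_separators_py text separators out) := by unfold Spec_split_by_separators_py; infer_instance

-- ===== CLAIM (what is proved, stated in full; the proofs are below) =====
def Claim_equal_split_by_separators_py : Prop := ∀ (text : String) (separators : List String), Dom_split_by_separators_py text separators → Pre_split_by_separators_py text separators → Spec_split_by_separators_py text separators (split_by_separators_py text separators)

-- ===== LEMMAS AND PROOFS =====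
theorem splitLoopB_eq (text : String) : ∀ (seps : List String) (i last : Nat),
    seps ≠ [] → i + seps.length = last + 1 →
    splitLoopB text last i seps = split_by_separators_py text seps := by
  intro seps
  induction seps with
  | nil => intro i last h _; exact absurd rfl h
  | cons sep rest ih =>
    intro i last _ hlen
    simp only [List.length_cons] at hlen
    simp only [splitLoopB, split_by_separators_py]
    by_cases hr : rest = []
    · subst hr
      have hi : i = last := by simp at hlen; omega
      simp [hi]
    · have hil : i ≠ last := by
        have := List.length_pos_of_ne_nil hr
        omega
      by_cases hp : (((PySem.Str.split? text sep).getD []).filter (fun p => PySem.Str.strip p != "")).length ≤ 1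
      · have : ¬ ((((PySem.Str.split? text sep).getD []).filter (fun p => PySem.Str.strip p != "")).length > 1 ∨ i = last) := by
          push Not; exact ⟨by omega, hil⟩
        rw [if_neg this, if_pos ⟨hp, hr⟩]
        exact ih (i + 1) last hr (by omega)
      · simp [hp, hr, show (((PySem.Str.split? text sep).getD []).filter (fun p => PySem.Str.strip p != "")).length > 1 by omega]

-- ===== VERDICT (by name: the statement is the Claim_ definition above) =====
theorem split_by_separators_py_spec : Claim_equal_split_by_separators_py := by
  intro text separators _ _
  unfold Spec_split_by_separators_py split_by_separators_py_alt
  match separators with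
  | [] => simp [split_by_separators_py]
  | sep :: rest =>
    simp only [if_neg (List.cons_ne_nil sep rest)]
    exact (splitLoopB_eq text (sep :: rest) 0 ((sep :: rest).length - 1)
      (List.cons_ne_nil sep rest) (by simp)).symm
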